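-- pv_equiv track=rewrite | github.com/jonathan-kofman/aria-os | aria_os/build_doc.py | _bom_to_groups
-- ===== SOURCE A (Python) =====
-- _PCB_FAMILY_ORDER = [
--     ("passive_smd",   ["Resistor_SMD", "Capacitor_SMD", "Inductor_SMD",
--                          "Fuse_SMD", "Diode_SMD"]),
--     ("led_smd",       ["LED_SMD"]),
--     ("semiconductor", ["Package_SO", "Package_TO", "Package_DFN_QFN",
--                          "Package_QFP", "Package_BGA", "Package_TO_SOT_SMD"]),
--     ("crystal",       ["Crystal", "Oscillator"]),
--     ("through_hole",  ["Resistor_THT", "Capacitor_THT", "Diode_THT",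
--                          "LED_THT", "Package_DIP"]),
--     ("connector",     ["Connector_PinHeader", "Connector_USB",
--                          "Connector_JST", "Connector_Molex",
--                          "Connector_Phoenix", "Connector_Generic"]),
--     ("misc",          []),    # fallback bucket
-- ]
--
-- def _classify_footprint(fp: str) -> str:
--     if not fp:
--         return "misc"
--     head = fp.split(":", 1)[0]
--     for family, prefixes in _PCB_FAMILY_ORDER:
--         if any(head.startswith(p) for p in prefixes):
--             return family
--     return "misc"
--
-- def _bom_to_groups(bom: dict) -> dict[str, list[dict]]:
--     """Group BOM components by solder-order family."""
--     by_family: dict[str, list[dict]] = {f: [] for f, _ in _PCB_FAMILY_ORDER}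
--     for comp in bom.get("components", []):
--         fam = _classify_footprint(comp.get("footprint", ""))
--         by_family.setdefault(fam, []).append(comp)
--     # Sort within each family by ref designator for stable output
--     for parts in by_family.values():
--         parts.sort(key=lambda c: (c.get("ref", ""), c.get("value", "")))
--     return by_family
-- ===== SOURCE B (Python) =====
-- _PCB_FAMILY_ORDER = [
--     ("passive_smd",   ["Resistor_SMD", "Capacitor_SMD", "Inductor_SMD",
--                          "Fuse_SMD", "Diode_SMD"]),
--     ("led_smd",       ["LED_SMD"]),
--     ("semiconductor", ["Package_SO", "Package_TO", "Package_DFN_QFN",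
--                          "Package_QFP", "Package_BGA", "Package_TO_SOT_SMD"]),
--     ("crystal",       ["Crystal", "Oscillator"]),
--     ("through_hole",  ["Resistor_THT", "Capacitor_THT", "Diode_THT",
--                          "LED_THT", "Package_DIP"]),
--     ("connector",     ["Connector_PinHeader", "Connector_USB",
--                          "Connector_JST", "Connector_Molex",
--                          "Connector_Phoenix", "Connector_Generic"]),
--     ("misc",          []),    # fallback bucket
-- ]
--
-- # prefix -> family, flattened in family-priority order
-- _FAMILY_OF_PREFIX = [(p, fam) for fam, ps in _PCB_FAMILY_ORDER for p in ps]
--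
-- def _classify_footprint(fp: str) -> str:
--     head = fp.partition(":")[0]
--     return next((fam for p, fam in _FAMILY_OF_PREFIX if head.startswith(p)), "misc")
--
-- def _bom_to_groups(bom: dict) -> dict[str, list[dict]]:
--     """Group BOM components by solder-order family (single global stable sort)."""
--     comps = sorted(bom.get("components", []),
--                    key=lambda c: (c.get("ref", ""), c.get("value", "")))
--     return {fam: [c for c in comps
--                   if _classify_footprint(c.get("footprint", "")) == fam]
--             for fam, _ in _PCB_FAMILY_ORDER}
-- ===== Notes on version B (the rewrite author's own statement) =====
-- stated objective: alternative
-- what changed: Instead of grouping components into per-family buckets and then sorting each bucket, B performs one global stable sort by (ref, value) and then partitions the sorted list over the pre-ordered family list in a single classify-and-filter pass (classification itself via one flattened prefix->family first-match list instead of a nested any() loop); stability of the sort guarantees each bucket comes out identical.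
import Mathlib
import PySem

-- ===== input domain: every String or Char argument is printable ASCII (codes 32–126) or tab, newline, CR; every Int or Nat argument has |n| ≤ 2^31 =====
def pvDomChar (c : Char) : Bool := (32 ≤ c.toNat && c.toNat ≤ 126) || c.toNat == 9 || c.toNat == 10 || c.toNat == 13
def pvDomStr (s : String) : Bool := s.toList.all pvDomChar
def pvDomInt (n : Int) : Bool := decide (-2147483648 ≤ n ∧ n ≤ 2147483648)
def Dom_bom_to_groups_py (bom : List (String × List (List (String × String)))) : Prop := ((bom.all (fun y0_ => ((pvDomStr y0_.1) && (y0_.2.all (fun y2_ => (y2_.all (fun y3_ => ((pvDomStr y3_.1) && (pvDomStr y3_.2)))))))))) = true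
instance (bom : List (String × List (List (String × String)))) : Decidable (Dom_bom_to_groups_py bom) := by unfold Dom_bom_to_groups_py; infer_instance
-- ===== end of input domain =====

-- B replaces per-family sorts after grouping by ONE global stable sort followed by a single
-- classify-and-partition pass over the family list (objective: alternative decomposition, same cost).

-- shared module constant _PCB_FAMILY_ORDER
def pvOrder : List (String × List String) :=
  [("passive_smd",   ["Resistor_SMD", "Capacitor_SMD", "Inductor_SMD", "Fuse_SMD", "Diode_SMD"]),
   ("led_smd",       ["LED_SMD"]),
   ("semiconductor", ["Package_SO", "Package_TO", "Package_DFN_QFN", "Package_QFP", "Package_BGA", "Package_TO_SOT_SMD"]),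
   ("crystal",       ["Crystal", "Oscillator"]),
   ("through_hole",  ["Resistor_THT", "Capacitor_THT", "Diode_THT", "LED_THT", "Package_DIP"]),
   ("connector",     ["Connector_PinHeader", "Connector_USB", "Connector_JST", "Connector_Molex", "Connector_Phoenix", "Connector_Generic"]),
   ("misc",          [])]

-- ===== PORT A =====
-- the 'for family, prefixes in _PCB_FAMILY_ORDER' loop of _classify_footprint
def pvClassifyLoopA (head : String) : List (String × List String) → String
  | [] => "misc"
  | (family, prefixes) :: rest =>
      if prefixes.any (fun p => PySem.Str.startswith head p) then family
      else pvClassifyLoopA head rest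

def pvClassifyA (fp : String) : String :=
  if fp = "" then "misc"
  else
    let head := ((PySem.Str.splitMax? fp ":" 1).getD []).headD ""
    pvClassifyLoopA head pvOrder

def bom_to_groups_py (bom : List (String × List (List (String × String)))) : List (String × List (List (String × String))) :=
  -- by_family = {f: [] for f, _ in _PCB_FAMILY_ORDER}
  let d0 : PySem.Dict String (List (List (String × String))) :=
    pvOrder.foldl (fun d fp => d.insert fp.1 []) PySem.Dict.empty
  -- for comp in bom.get("components", []): by_family.setdefault(fam, []).append(comp)
  let comps := (PySem.Dict.ofList bom).getD "components" []
  let d := comps.foldl (fun d comp =>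
    d.modify (pvClassifyA ((PySem.Dict.ofList comp).getD "footprint" "")) [] (fun l => l ++ [comp])) d0
  -- for parts in by_family.values(): parts.sort(key=lambda c: (c.get("ref",""), c.get("value","")))
  d.items.map (fun pr =>
    (pr.1, PySem.List.sorted2 pr.2 (fun c => (PySem.Dict.ofList c).getD "ref" "")
                                   (fun c => (PySem.Dict.ofList c).getD "value" "")))

-- ===== PORT B =====
-- _FAMILY_OF_PREFIX = [(p, fam) for fam, ps in _PCB_FAMILY_ORDER for p in ps]
def pvPrefixFam : List (String × String) :=
  pvOrder.flatMap (fun fp => fp.2.map (fun p => (p, fp.1)))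

def pvClassifyB (fp : String) : String :=
  -- fp.partition(":")[0]: the prefix of fp before the first ':' (exact for every string)
  let head := String.ofList (fp.toList.takeWhile (fun c => c != ':'))
  (((pvPrefixFam.find? (fun pf => PySem.Str.startswith head pf.1)).map (fun pf => pf.2))).getD "misc"

def bom_to_groups_py_alt (bom : List (String × List (List (String × String)))) : List (String × List (List (String × String))) :=
  let comps := PySem.List.sorted2 ((PySem.Dict.ofList bom).getD "components" [])
                 (fun c => (PySem.Dict.ofList c).getD "ref" "")
                 (fun c => (PySem.Dict.ofList c).getD "value" "")
  pvOrder.map (fun fp =>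
    (fp.1, comps.filter (fun c => pvClassifyB ((PySem.Dict.ofList c).getD "footprint" "") == fp.1)))

-- ===== PRECONDITION & SPEC =====
def Spec_bom_to_groups_py (bom : List (String × List (List (String × String)))) (out : List (String × List (List (String × String)))) : Prop := out = bom_to_groups_py_alt bom
instance (bom : List (String × List (List (String × String)))) (out : List (String × List (List (String × String)))) : Decidable (Spec_bom_to_groups_py bom out) := by unfold Spec_bom_to_groups_py; infer_instance

-- ===== CLAIM (what is proved, stated in full; the proofs are below) =====
def Claim_equal_bom_to_groups_py : Prop := ∀ (bom : List (String × List (List (String × String)))), Dom_bom_to_groups_py bom → Spec_bom_to_groups_py bom (bom_to_groups_py bom)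

-- ===== LEMMAS AND PROOFS =====


-- branch lemmas for A's classifier loop and for insertBy
theorem pv_loopA_cons_pos (head family : String) (prefixes : List String)
    (rest : List (String × List String))
    (h : prefixes.any (fun p => PySem.Str.startswith head p) = true) :
    pvClassifyLoopA head ((family, prefixes) :: rest) = family := by
  simp only [pvClassifyLoopA, h]
  rw [if_true]

theorem pv_loopA_cons_neg (head family : String) (prefixes : List String)
    (rest : List (String × List String))
    (h : prefixes.any (fun p => PySem.Str.startswith head p) = false) :
    pvClassifyLoopA head ((family, prefixes) :: rest) = pvClassifyLoopA head rest := by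
  simp only [pvClassifyLoopA, h]
  rw [if_neg Bool.false_ne_true]

theorem pv_insertBy_cons_pos {α : Type} (before : α → α → Bool) (x y : α) (ys : List α)
    (h : before x y = true) :
    PySem.List.insertBy before x (y :: ys) = x :: y :: ys := by
  simp [PySem.List.insertBy, h]

theorem pv_insertBy_cons_neg {α : Type} (before : α → α → Bool) (x y : α) (ys : List α)
    (h : before x y = false) :
    PySem.List.insertBy before x (y :: ys) = y :: PySem.List.insertBy before x ys := by
  simp [PySem.List.insertBy, h]

-- ---- the two classifiers agree ----

-- head of s.split(":", 1): the go loop of splitOnMax with maxsplit 1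
theorem pv_go_zero (fuel : Nat) (l cur : List Char) (acc : List (List Char)) :
    PySem.Chars.splitOnMax.go [':'] fuel 0 l cur acc = ((cur.reverse ++ l) :: acc).reverse := by
  cases fuel with
  | zero => rfl
  | succ f => cases l with
    | nil => simp [PySem.Chars.splitOnMax.go]
    | cons c rest => simp [PySem.Chars.splitOnMax.go]

theorem pv_go_one (l : List Char) : ∀ (fuel : Nat) (cur : List Char) (acc : List (List Char)),
    l.length < fuel →
    PySem.Chars.splitOnMax.go [':'] fuel 1 l cur acc =
      acc.reverse ++ (cur.reverse ++ l.takeWhile (fun c => c != ':')) ::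
        (if ':' ∈ l then [(l.dropWhile (fun c => c != ':')).drop 1] else []) := by
  induction l with
  | nil =>
    intro fuel cur acc h
    cases fuel with
    | zero => omega
    | succ f => simp [PySem.Chars.splitOnMax.go]
  | cons c rest ih =>
    intro fuel cur acc h
    cases fuel with
    | zero => simp at h
    | succ f =>
      by_cases hc : c = ':'
      · subst hc
        have hpre : List.isPrefixOf [':'] (':' :: rest) = true := by
          simp [List.isPrefixOf]
        simp only [PySem.Chars.splitOnMax.go, hpre]
        rw [pv_go_zero]
        simp [List.takeWhile, List.dropWhile]
      · have hne : ¬ (':' = c) := fun h' => hc h'.symm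
        have hpre : List.isPrefixOf [':'] (c :: rest) = false := by
          simp [List.isPrefixOf]
          exact hne
        simp only [PySem.Chars.splitOnMax.go, hpre]
        have hlen : rest.length < f := by simp at h; omega
        rw [ih f (c :: cur) acc hlen]
        have hcb : (c != ':') = true := by simp [hc]
        simp [List.takeWhile, List.dropWhile, hcb, hne]

-- the head A takes from fp.split(":", 1) is B's fp.partition(":")[0]
theorem pv_head_eq (fp : String) :
    ((PySem.Str.splitMax? fp ":" 1).getD []).headD "" =
      String.ofList (fp.toList.takeWhile (fun c => c != ':')) := by
  have hsep : (":".toList) = [':'] := rfl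
  simp only [PySem.Str.splitMax?, PySem.Chars.splitMax?, hsep]
  have hso : (PySem.Chars.splitOnMax fp.toList [':'] 1) =
      (fp.toList.takeWhile (fun c => c != ':')) ::
        (if ':' ∈ fp.toList then [(fp.toList.dropWhile (fun c => c != ':')).drop 1] else []) := by
    simp only [PySem.Chars.splitOnMax]
    rw [if_neg (by omega)]
    have := pv_go_one fp.toList (fp.toList.length + 1) [] [] (by omega)
    simpa using this
  rw [hso]
  simp

-- A's family loop equals B's first-match over the flattened (prefix, family) list
theorem pv_loop_eq (head : String) (l : List (String × List String)) :
    pvClassifyLoopA head l =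
      ((((l.flatMap (fun fp => fp.2.map (fun p => (p, fp.1)))).find?
          (fun pf => PySem.Str.startswith head pf.1)).map (fun pf => pf.2))).getD "misc" := by
  induction l with
  | nil => rfl
  | cons x rest ih =>
    obtain ⟨family, prefixes⟩ := x
    rw [List.flatMap_cons, List.find?_append, List.find?_map]
    have hcomp : ((fun pf : String × String => PySem.Str.startswith head pf.1) ∘
        fun p => (p, family)) = (fun p => PySem.Str.startswith head p) := rfl
    rw [hcomp]
    cases hf : List.find? (fun p => PySem.Str.startswith head p) prefixes with
    | some q =>
      have hany : prefixes.any (fun p => PySem.Str.startswith head p) = true :=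
        List.any_eq_true.mpr ⟨q, List.mem_of_find?_eq_some hf, List.find?_some hf⟩
      rw [pv_loopA_cons_pos head family prefixes rest hany]
      rfl
    | none =>
      have hany : prefixes.any (fun p => PySem.Str.startswith head p) = false := by
        refine List.any_eq_false.mpr ?_
        intro p1 hp1
        exact fun hsw => (List.find?_eq_none.mp hf p1 hp1) hsw
      rw [pv_loopA_cons_neg head family prefixes rest hany]
      simpa using ih

theorem pv_classify_eq (fp : String) : pvClassifyA fp = pvClassifyB fp := by
  by_cases h : fp = ""
  · subst h; decide
  · simp only [pvClassifyA, pvClassifyB, if_neg h]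
    rw [pv_head_eq, pv_loop_eq]
    rfl

-- the classifier only produces family names of pvOrder
theorem pv_classifyLoopA_mem (head : String) (l : List (String × List String)) :
    pvClassifyLoopA head l = "misc" ∨ pvClassifyLoopA head l ∈ l.map (fun fp => fp.1) := by
  induction l with
  | nil => left; rfl
  | cons x rest ih =>
    obtain ⟨family, prefixes⟩ := x
    cases hany : prefixes.any (fun p => PySem.Str.startswith head p) with
    | true =>
      rw [pv_loopA_cons_pos head family prefixes rest hany]
      right; simp
    | false =>
      rw [pv_loopA_cons_neg head family prefixes rest hany]
      rcases ih with h1 | h1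
      · left; exact h1
      · right; simp only [List.map_cons]; exact List.mem_cons_of_mem _ h1

-- ---- Set.update with already-present elements is the identity ----
theorem pv_set_update_id {α : Type} [BEq α] [LawfulBEq α] (s : PySem.Set α) (l : List α)
    (h : ∀ x ∈ l, s.contains x = true) : PySem.Set.update s l = s := by
  induction l generalizing s with
  | nil => rfl
  | cons x rest ih =>
    simp only [PySem.Set.update, List.foldl_cons]
    have hx : PySem.Set.add s x = s := by
      simp only [PySem.Set.add, h x (by simp)]
      rw [if_true]
    rw [hx]
    exact ih s (fun y hy => h y (by simp [hy]))

-- ---- stability: filter commutes with the stable insertion sort ----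

theorem pv_insertBy_eq_cons {α : Type} (before : α → α → Bool) (x : α) (l : List α)
    (h : ∀ y ∈ l, before x y = true) : PySem.List.insertBy before x l = x :: l := by
  cases l with
  | nil => rfl
  | cons y ys => exact pv_insertBy_cons_pos before x y ys (h y (by simp))

theorem pv_pairwise_insertBy {α : Type} (before : α → α → Bool)
    (hasym : ∀ a b, before a b = true → before b a = false)
    (htrans : ∀ a b c, before a b = true → before c b = false → before a c = true)
    (x : α) (acc : List α) (h : acc.Pairwise (fun a b => before b a = false)) :
    (PySem.List.insertBy before x acc).Pairwise (fun a b => before b a = false) := by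
  induction acc with
  | nil => simp [PySem.List.insertBy]
  | cons c cs ih =>
    rw [List.pairwise_cons] at h
    obtain ⟨hc, hcs⟩ := h
    cases hb : before x c with
    | true =>
      rw [pv_insertBy_cons_pos before x c cs hb]
      refine List.Pairwise.cons ?_ (List.Pairwise.cons hc hcs)
      intro z hz
      rcases List.mem_cons.mp hz with rfl | hz
      · exact hasym x z hb
      · exact hasym x z (htrans x c z hb (hc z hz))
    | false =>
      rw [pv_insertBy_cons_neg before x c cs hb]
      refine List.Pairwise.cons ?_ (ih hcs)
      intro z hz
      rcases (PySem.List.mem_insertBy before x z cs).mp hz with rfl | hz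
      · exact hb
      · exact hc z hz

theorem pv_filter_insertBy {α : Type} (before : α → α → Bool)
    (htrans : ∀ a b c, before a b = true → before c b = false → before a c = true)
    (p : α → Bool) (x : α) (acc : List α)
    (h : acc.Pairwise (fun a b => before b a = false)) :
    (PySem.List.insertBy before x acc).filter p =
      if p x then PySem.List.insertBy before x (acc.filter p) else acc.filter p := by
  induction acc with
  | nil => cases hpx : p x <;> simp [PySem.List.insertBy, hpx]
  | cons c cs ih =>
    rw [List.pairwise_cons] at h
    obtain ⟨hc, hcs⟩ := h
    cases hb : before x c with
    | true =>
      rw [pv_insertBy_cons_pos before x c cs hb]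
      have hall : ∀ y ∈ (c :: cs).filter p, before x y = true := by
        intro y hy
        rcases List.mem_cons.mp (List.mem_of_mem_filter hy) with rfl | hy'
        · exact hb
        · exact htrans x c y hb (hc y hy')
      cases hpx : p x with
      | true =>
        rw [List.filter_cons_of_pos hpx, if_pos rfl, pv_insertBy_eq_cons before x _ hall]
      | false =>
        rw [List.filter_cons_of_neg (by simp [hpx]), if_neg (by simp)]
    | false =>
      rw [pv_insertBy_cons_neg before x c cs hb]
      cases hpc : p c with
      | true =>
        rw [List.filter_cons_of_pos hpc, List.filter_cons_of_pos hpc, ih hcs]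
        cases hpx : p x with
        | true => rw [if_pos rfl, if_pos rfl, pv_insertBy_cons_neg before x c _ hb]
        | false => rw [if_neg (by simp), if_neg (by simp)]
      | false =>
        rw [List.filter_cons_of_neg (by simp [hpc]), List.filter_cons_of_neg (by simp [hpc]), ih hcs]

theorem pv_filter_foldl_insertBy {α : Type} (before : α → α → Bool)
    (hasym : ∀ a b, before a b = true → before b a = false)
    (htrans : ∀ a b c, before a b = true → before c b = false → before a c = true)
    (p : α → Bool) (xs : List α) :
    ∀ (acc : List α), acc.Pairwise (fun a b => before b a = false) →
    (xs.foldl (fun a x => PySem.List.insertBy before x a) acc).filter p =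
      (xs.filter p).foldl (fun a x => PySem.List.insertBy before x a) (acc.filter p) := by
  induction xs with
  | nil => intro acc _; rfl
  | cons x xs ih =>
    intro acc hacc
    simp only [List.foldl_cons]
    rw [ih _ (pv_pairwise_insertBy before hasym htrans x acc hacc)]
    rw [pv_filter_insertBy before htrans p x acc hacc]
    cases hpx : p x with
    | true => rw [List.filter_cons_of_pos hpx, List.foldl_cons, if_pos rfl]
    | false => rw [List.filter_cons_of_neg (by simp [hpx]), if_neg (by simp)]

-- the concrete lexicographic before of sorted2 over String keys
theorem pv_before_eq {α : Type} (k1 k2 : α → String) (a b : α) :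
    (decide (k1 a < k1 b) || !decide (k1 b < k1 a) && decide (k2 a < k2 b)) =
      decide (toLex (k1 a, k2 a) < toLex (k1 b, k2 b)) := by
  rcases lt_trichotomy (k1 a) (k1 b) with h | h | h
  · simp [Prod.Lex.lt_iff, h, asymm h]
  · simp [Prod.Lex.lt_iff, h]
  · simp [Prod.Lex.lt_iff, h, asymm h, ne_of_gt h]

theorem pv_filter_sorted2 {α : Type} (k1 k2 : α → String) (p : α → Bool) (l : List α) :
    (PySem.List.sorted2 l k1 k2).filter p = PySem.List.sorted2 (l.filter p) k1 k2 := by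
  have hb : (fun a b => decide (k1 a < k1 b) || !decide (k1 b < k1 a) && decide (k2 a < k2 b)) =
      (fun a b => decide (toLex (k1 a, k2 a) < toLex (k1 b, k2 b))) := by
    funext a b; exact pv_before_eq k1 k2 a b
  simp only [PySem.List.sorted2, if_neg (by decide : ¬ (false = true)), hb]
  exact pv_filter_foldl_insertBy _
    (fun a b h => by
      simp only [decide_eq_true_eq] at h
      simp only [decide_eq_false_iff_not]
      exact asymm h)
    (fun a b c h1 h2 => by
      simp only [decide_eq_true_eq] at h1
      simp only [decide_eq_false_iff_not, not_lt] at h2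
      simp only [decide_eq_true_eq]
      exact lt_of_lt_of_le h1 h2)
    p l [] List.Pairwise.nil

-- ---- assembling the two ports ----

-- every classification is one of the seven family names
theorem pv_classifyA_mem (fp : String) :
    pvClassifyA fp ∈ (["passive_smd", "led_smd", "semiconductor", "crystal", "through_hole",
      "connector", "misc"] : List String) := by
  by_cases h : fp = ""
  · simp only [pvClassifyA, if_pos h]; decide
  · simp only [pvClassifyA, if_neg h]
    rcases pv_classifyLoopA_mem (((PySem.Str.splitMax? fp ":" 1).getD []).headD "") pvOrder
      with h1 | h1
    · rw [h1]; decide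
    · rw [show pvOrder.map (fun fp => fp.1) =
        (["passive_smd", "led_smd", "semiconductor", "crystal", "through_hole",
          "connector", "misc"] : List String) from by decide] at h1
      exact h1

-- the full grouping loop of A, evaluated bucket by bucket against B's partition of the sorted list
set_option maxHeartbeats 2000000 in
theorem pv_main (comps : List (List (String × String))) :
    (List.foldl (fun d comp =>
        d.modify (pvClassifyA ((PySem.Dict.ofList comp).getD "footprint" "")) []
          (fun l => l ++ [comp]))
      (List.foldl (fun d fp => d.insert fp.1 ([] : List (List (String × String))))
        PySem.Dict.empty pvOrder)
      comps).items.map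
        (fun pr => (pr.1, PySem.List.sorted2 pr.2
          (fun c => (PySem.Dict.ofList c).getD "ref" "")
          (fun c => (PySem.Dict.ofList c).getD "value" ""))) =
    pvOrder.map (fun fp =>
      (fp.1, (PySem.List.sorted2 comps
          (fun c => (PySem.Dict.ofList c).getD "ref" "")
          (fun c => (PySem.Dict.ofList c).getD "value" "")).filter
        (fun c => pvClassifyB ((PySem.Dict.ofList c).getD "footprint" "") == fp.1))) := by
  have h1 : (List.foldl (fun d comp =>
        d.modify (pvClassifyA ((PySem.Dict.ofList comp).getD "footprint" "")) []
          (fun l => l ++ [comp]))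
      (List.foldl (fun d fp => d.insert fp.1 ([] : List (List (String × String))))
        PySem.Dict.empty pvOrder)
      comps) =
      (List.foldl (fun d p => d.modify p.1 [] (fun x => x ++ [p.2]))
        (List.foldl (fun d fp => d.insert fp.1 ([] : List (List (String × String))))
          PySem.Dict.empty pvOrder)
        (comps.map (fun c => (pvClassifyA ((PySem.Dict.ofList c).getD "footprint" ""), c)))) := by
    rw [List.foldl_map]
  have hnodup : (List.foldl (fun d comp =>
        d.modify (pvClassifyA ((PySem.Dict.ofList comp).getD "footprint" "")) []
          (fun l => l ++ [comp]))
      (List.foldl (fun d fp => d.insert fp.1 ([] : List (List (String × String))))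
        PySem.Dict.empty pvOrder)
      comps).keys.Nodup :=
    PySem.Dict.nodup_keys_foldl_modify_key comps
      (fun comp => pvClassifyA ((PySem.Dict.ofList comp).getD "footprint" "")) []
      (fun _ comp => fun l => l ++ [comp]) _ (by decide)
  have hkeys : (List.foldl (fun d comp =>
        d.modify (pvClassifyA ((PySem.Dict.ofList comp).getD "footprint" "")) []
          (fun l => l ++ [comp]))
      (List.foldl (fun d fp => d.insert fp.1 ([] : List (List (String × String))))
        PySem.Dict.empty pvOrder)
      comps).keys =
      (["passive_smd", "led_smd", "semiconductor", "crystal", "through_hole",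
        "connector", "misc"] : List String) := by
    rw [PySem.Dict.keys_foldl_modify_key comps
      (fun comp => pvClassifyA ((PySem.Dict.ofList comp).getD "footprint" "")) []
      (fun _ comp => fun l => l ++ [comp])]
    rw [pv_set_update_id]
    · decide
    · intro x hx
      obtain ⟨c, _, rfl⟩ := List.mem_map.mp hx
      refine List.elem_eq_true_of_mem ?_
      have := pv_classifyA_mem ((PySem.Dict.ofList c).getD "footprint" "")
      rw [show (List.foldl (fun d fp => d.insert fp.1 ([] : List (List (String × String))))
        PySem.Dict.empty pvOrder).keys =
        (["passive_smd", "led_smd", "semiconductor", "crystal", "through_hole",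
          "connector", "misc"] : List String) from by decide]
      exact this
  have hbucket : ∀ f : String,
      (List.foldl (fun d fp => d.insert fp.1 ([] : List (List (String × String))))
        PySem.Dict.empty pvOrder).getD f [] = [] →
      (List.foldl (fun d comp =>
          d.modify (pvClassifyA ((PySem.Dict.ofList comp).getD "footprint" "")) []
            (fun l => l ++ [comp]))
        (List.foldl (fun d fp => d.insert fp.1 ([] : List (List (String × String))))
          PySem.Dict.empty pvOrder)
        comps).getD f [] =
      comps.filter (fun c => pvClassifyA ((PySem.Dict.ofList c).getD "footprint" "") == f) := by
    intro f hf
    rw [h1, PySem.Dict.getD_foldl_modify_append, hf, List.nil_append, List.filter_map,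
      List.map_map]
    have hcomp : ((fun p : String × List (String × String) => p.1 == f) ∘
        (fun c => (pvClassifyA ((PySem.Dict.ofList c).getD "footprint" ""), c))) =
        (fun c => pvClassifyA ((PySem.Dict.ofList c).getD "footprint" "") == f) := rfl
    have hsnd : ((fun p : String × List (String × String) => p.2) ∘
        (fun c => (pvClassifyA ((PySem.Dict.ofList c).getD "footprint" ""), c))) = id := rfl
    rw [hcomp, hsnd, List.map_id]
  have hsb : ∀ f : String,
      (List.foldl (fun d fp => d.insert fp.1 ([] : List (List (String × String))))
        PySem.Dict.empty pvOrder).getD f [] = [] →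
      PySem.List.sorted2 ((List.foldl (fun d comp =>
          d.modify (pvClassifyA ((PySem.Dict.ofList comp).getD "footprint" "")) []
            (fun l => l ++ [comp]))
        (List.foldl (fun d fp => d.insert fp.1 ([] : List (List (String × String))))
          PySem.Dict.empty pvOrder)
        comps).getD f [])
        (fun c => (PySem.Dict.ofList c).getD "ref" "")
        (fun c => (PySem.Dict.ofList c).getD "value" "") =
      (PySem.List.sorted2 comps
        (fun c => (PySem.Dict.ofList c).getD "ref" "")
        (fun c => (PySem.Dict.ofList c).getD "value" "")).filter
        (fun c => pvClassifyB ((PySem.Dict.ofList c).getD "footprint" "") == f) := by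
    intro f hf
    rw [hbucket f hf, ← pv_filter_sorted2]
    congr 1
    funext c
    rw [pv_classify_eq]
  rw [PySem.Dict.items_eq_map_keys _ hnodup [], hkeys]
  simp only [pvOrder, List.map_cons, List.map_nil, List.cons.injEq, Prod.mk.injEq]
  exact ⟨⟨trivial, hsb _ (by decide)⟩, ⟨trivial, hsb _ (by decide)⟩, ⟨trivial, hsb _ (by decide)⟩,
    ⟨trivial, hsb _ (by decide)⟩, ⟨trivial, hsb _ (by decide)⟩, ⟨trivial, hsb _ (by decide)⟩,
    ⟨trivial, hsb _ (by decide)⟩, trivial⟩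

-- ===== VERDICT (by name: the statement is the Claim_ definition above) =====
theorem bom_to_groups_py_spec : Claim_equal_bom_to_groups_py := by
  intro bom _
  unfold Spec_bom_to_groups_py bom_to_groups_py bom_to_groups_py_alt
  exact pv_main ((PySem.Dict.ofList bom).getD "components" [])
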